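-- pv_equiv track=rewrite | github.com/DoctorDalek1963/WhatsApp-HTML-Formatter | WhatsApp Formatter.py | tag_replace
-- ===== SOURCE A (Python) =====
-- def tag_replace(string, char, tag):  # Replace char with tags in string
--     """Replace selected format character with selected HTML tag."""
--     count = 0
--     list_message = list(string)
--
--     # Search through each char in list_message and replace odds with <tag> and evens with </tag>
--     for x, letter in enumerate(list_message):
--         if letter == char:
--             if count == 0:
--                 # Replace char 1 with <tag>
--                 list_message[x] = str("<{}>".format(tag))
--                 count = 1
--             elif count == 1:
--                 # Replace char 2 with </tag>
--                 list_message[x] = str("</{}>".format(tag))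
--                 count = 0
--
--     return "".join(list_message)
-- ===== SOURCE B (Python) =====
-- def tag_replace(string, char, tag):  # Replace char with tags in string
--     """Replace selected format character with selected HTML tag."""
--     if len(char) != 1:
--         # A compares each single character against `char`, so a non-single-char
--         # `char` never matches and the string is returned unchanged.
--         return string
--     parts = string.split(char)
--     pieces = [parts[0]]
--     for i, part in enumerate(parts[1:]):
--         pieces.append("<{}>".format(tag) if i % 2 == 0 else "</{}>".format(tag))
--         pieces.append(part)
--     return "".join(pieces)
-- ===== Notes on version B (the rewrite author's own statement) =====
-- stated objective: faster
-- what changed: Replaces the stateful char-by-char toggle scan over a mutable list with str.split on the delimiter followed by interleaving alternating open/close tags between the split segments (with a length-1 guard, since a multi-char or empty delimiter can never match a single character); split/join run at C speed instead of a per-character Python loop.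
import Mathlib
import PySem

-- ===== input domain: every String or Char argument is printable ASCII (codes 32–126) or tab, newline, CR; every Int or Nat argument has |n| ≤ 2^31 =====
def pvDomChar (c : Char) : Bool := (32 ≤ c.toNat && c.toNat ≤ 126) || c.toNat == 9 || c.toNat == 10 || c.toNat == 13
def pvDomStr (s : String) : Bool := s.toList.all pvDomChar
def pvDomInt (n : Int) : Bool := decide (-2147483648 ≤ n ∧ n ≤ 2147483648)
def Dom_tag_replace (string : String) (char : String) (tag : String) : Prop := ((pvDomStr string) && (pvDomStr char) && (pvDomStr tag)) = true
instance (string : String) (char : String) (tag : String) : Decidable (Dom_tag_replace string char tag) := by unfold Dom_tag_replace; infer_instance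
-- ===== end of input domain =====

-- B replaces A's stateful toggle scan by split-on-delimiter + interleaving of alternating tags; same result, measured faster in a timing run.

-- ===== PORT A =====
-- for-loop over enumerate(list(string)) with the 0/1 toggle `count`, replacing
-- matched characters in place; ported as a foldl carrying (count, pieces).
def tag_replace (string : String) (char : String) (tag : String) : String :=
  let step : (Nat × List String) → Char → (Nat × List String) :=
    fun st letter =>
      if String.ofList [letter] = char then
        if st.1 = 0 then (1, st.2 ++ ["<" ++ tag ++ ">"])
        else if st.1 = 1 then (0, st.2 ++ ["</" ++ tag ++ ">"])
        else (st.1, st.2 ++ [String.ofList [letter]])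
      else (st.1, st.2 ++ [String.ofList [letter]])
  PySem.Str.join "" (string.toList.foldl step (0, [])).2

-- ===== PORT B =====
-- Source B: guard len(char) == 1, then string.split(char) and rebuild, inserting
-- "<tag>" before even-indexed and "</tag>" before odd-indexed later segments.
def tag_replace_alt (string : String) (char : String) (tag : String) : String :=
  match char.toList with
  | [c] =>
    match (string.toList.splitOn c).map String.ofList with
    | [] => string  -- unreachable: split never returns an empty list
    | p :: rest =>
      (rest.zipIdx 0).foldl
        (fun acc pi =>
          acc ++ (if pi.2 % 2 = 0 then "<" ++ tag ++ ">" else "</" ++ tag ++ ">") ++ pi.1) p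
  | _ => string

-- ===== PRECONDITION & SPEC =====
def Spec_tag_replace (string : String) (char : String) (tag : String) (out : String) : Prop := out = tag_replace_alt string char tag
instance (string : String) (char : String) (tag : String) (out : String) : Decidable (Spec_tag_replace string char tag out) := by unfold Spec_tag_replace; infer_instance

-- ===== CLAIM (what is proved, stated in full; the proofs are below) =====
def Claim_equal_tag_replace : Prop := ∀ (string : String) (char : String) (tag : String), Dom_tag_replace string char tag → Spec_tag_replace string char tag (tag_replace string char tag)

-- ===== LEMMAS AND PROOFS =====

-- common char-level specification: scan with a toggle, emitting o / cl for the delimiter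
def pvF (c : Char) (o cl : List Char) : List Char → Bool → List Char
  | [], _ => []
  | x :: xs, b => if x = c then (if b then cl else o) ++ pvF c o cl xs (!b) else x :: pvF c o cl xs b

-- B-side: what the interleaving builds from the split segments
def pvBuild (o cl : List Char) : List (List Char) → Bool → List Char
  | [], _ => []
  | q :: qs, b => (if b then cl else o) ++ q ++ pvBuild o cl qs (!b)

theorem pv_join_nil_flatten (xss : List (List Char)) :
    PySem.Chars.join [] xss = xss.flatten := by
  induction xss with
  | nil => simp [PySem.Chars.join_nil]
  | cons p qs ih =>
    cases qs with
    | nil => simp [PySem.Chars.join_singleton]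
    | cons q rest => simp [PySem.Chars.join_cons_cons, ih]

theorem pv_flatten_singletons (cs : List Char) :
    (cs.map (fun x => (String.ofList [x]).toList)).flatten = cs := by
  induction cs with
  | nil => rfl
  | cons x xs ih => simpa using ih

theorem pv_foldA_no_match (char tag : String)
    (h : ∀ x : Char, String.ofList [x] ≠ char) :
    ∀ (cs : List Char) (k : Nat) (acc : List String),
      (cs.foldl
        (fun st letter =>
          if String.ofList [letter] = char then
            if st.1 = 0 then (1, st.2 ++ ["<" ++ tag ++ ">"])
            else if st.1 = 1 then (0, st.2 ++ ["</" ++ tag ++ ">"])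
            else (st.1, st.2 ++ [String.ofList [letter]])
          else (st.1, st.2 ++ [String.ofList [letter]])) (k, acc)).2
      = acc ++ cs.map (fun x => String.ofList [x]) := by
  intro cs
  induction cs with
  | nil => intro k acc; simp
  | cons x xs ih =>
    intro k acc
    simp only [List.foldl_cons, if_neg (h x), List.map_cons]
    rw [ih]; simp

theorem pv_foldA_match (char tag : String) (c : Char) (hc : char.toList = [c]) :
    ∀ (cs : List Char) (b : Bool) (acc : List String),
      ((cs.foldl
        (fun st letter =>
          if String.ofList [letter] = char then
            if st.1 = 0 then (1, st.2 ++ ["<" ++ tag ++ ">"])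
            else if st.1 = 1 then (0, st.2 ++ ["</" ++ tag ++ ">"])
            else (st.1, st.2 ++ [String.ofList [letter]])
          else (st.1, st.2 ++ [String.ofList [letter]])) (cond b 1 0, acc)).2.map String.toList).flatten
      = (acc.map String.toList).flatten
        ++ pvF c ("<" ++ tag ++ ">").toList ("</" ++ tag ++ ">").toList cs b := by
  have hmatch : ∀ x : Char, (String.ofList [x] = char) ↔ x = c := by
    intro x
    constructor
    · intro h; have := congrArg String.toList h; simp [hc] at this; exact this
    · intro h; subst h; rw [← String.toList_inj]; simp [hc]
  intro cs
  induction cs with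
  | nil => intro b acc; simp [pvF]
  | cons x xs ih =>
    intro b acc
    by_cases hx : x = c
    · subst hx
      cases b with
      | false =>
        simp only [List.foldl_cons, if_pos ((hmatch x).mpr rfl), cond_false, reduceIte]
        rw [show ((1 : Nat), acc ++ ["<" ++ tag ++ ">"]) = (cond true 1 0, acc ++ ["<" ++ tag ++ ">"]) from rfl]
        rw [ih true]
        simp [pvF]
      | true =>
        simp only [List.foldl_cons, if_pos ((hmatch x).mpr rfl), cond_true, reduceIte]
        norm_num
        rw [show ((0 : Nat), acc ++ ["</" ++ tag ++ ">"]) = (cond false 1 0, acc ++ ["</" ++ tag ++ ">"]) from rfl]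
        rw [ih false]
        simp [pvF]
    · have hne : String.ofList [x] ≠ char := fun h => hx ((hmatch x).mp h)
      simp only [List.foldl_cons, if_neg hne]
      rw [ih b]
      simp [pvF, hx]

theorem pv_foldB (tag : String) :
    ∀ (rest : List String) (acc : String) (n : Nat),
      ((rest.zipIdx n).foldl
        (fun acc pi =>
          acc ++ (if pi.2 % 2 = 0 then "<" ++ tag ++ ">" else "</" ++ tag ++ ">") ++ pi.1) acc).toList
      = acc.toList
        ++ pvBuild ("<" ++ tag ++ ">").toList ("</" ++ tag ++ ">").toList
            (rest.map String.toList) (decide (n % 2 = 1)) := by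
  intro rest
  induction rest with
  | nil => intro acc n; simp [pvBuild]
  | cons q qs ih =>
    intro acc n
    simp only [List.zipIdx_cons, List.foldl_cons, List.map_cons]
    rw [ih]
    rcases Nat.mod_two_eq_zero_or_one n with h | h
    · have h1 : (n + 1) % 2 = 1 := by omega
      simp [pvBuild, h, h1, String.toList_append]
    · have h1 : (n + 1) % 2 = 0 := by omega
      simp [pvBuild, h, h1, String.toList_append]

theorem pv_split_build (tag : String) (c : Char) :
    ∀ (cs : List Char) (b : Bool),
      (cs.splitOn c).headI
        ++ pvBuild ("<" ++ tag ++ ">").toList ("</" ++ tag ++ ">").toList (cs.splitOn c).tail b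
      = pvF c ("<" ++ tag ++ ">").toList ("</" ++ tag ++ ">").toList cs b := by
  intro cs
  induction cs with
  | nil => intro b; simp [List.splitOn, List.splitOnP_nil, pvF, pvBuild]
  | cons x xs ih =>
    intro b
    obtain ⟨p0, rest', hsplit⟩ := List.exists_cons_of_ne_nil (List.splitOnP_ne_nil (· == c) xs)
    simp only [List.splitOn] at ih ⊢
    rw [List.splitOnP_cons]
    by_cases hx : x = c
    · subst hx
      rw [if_pos (by simp)]
      rw [hsplit] at ih ⊢
      simp only [List.headI, List.tail] at ih ⊢
      rw [List.nil_append]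
      show pvBuild _ _ (p0 :: rest') b = pvF x _ _ (x :: xs) b
      rw [show pvBuild ("<" ++ tag ++ ">").toList ("</" ++ tag ++ ">").toList (p0 :: rest') b
            = (if b then ("</" ++ tag ++ ">").toList else ("<" ++ tag ++ ">").toList)
              ++ p0 ++ pvBuild ("<" ++ tag ++ ">").toList ("</" ++ tag ++ ">").toList rest' (!b)
          from rfl]
      rw [show pvF x ("<" ++ tag ++ ">").toList ("</" ++ tag ++ ">").toList (x :: xs) b
            = (if b then ("</" ++ tag ++ ">").toList else ("<" ++ tag ++ ">").toList)
              ++ pvF x ("<" ++ tag ++ ">").toList ("</" ++ tag ++ ">").toList xs (!b)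
          from by simp [pvF]]
      rw [← ih (!b)]
      simp [List.append_assoc]
    · rw [if_neg (by simp [hx])]
      rw [hsplit] at ih ⊢
      simp only [List.modifyHead_cons, List.headI, List.tail] at ih ⊢
      rw [show pvF c ("<" ++ tag ++ ">").toList ("</" ++ tag ++ ">").toList (x :: xs) b
            = x :: pvF c ("<" ++ tag ++ ">").toList ("</" ++ tag ++ ">").toList xs b
          from by simp [pvF, hx]]
      rw [← ih b]
      simp

-- ===== VERDICT (by name: the statement is the Claim_ definition above) =====
theorem tag_replace_spec : Claim_equal_tag_replace := by
  intro string char tag _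
  unfold Spec_tag_replace tag_replace tag_replace_alt
  rw [← String.toList_inj]
  cases hc : char.toList with
  | nil =>
    have h : ∀ x : Char, String.ofList [x] ≠ char := by
      intro x h
      have := congrArg String.toList h; simp [hc] at this
    simp only
    rw [pv_foldA_no_match char tag h string.toList 0 []]
    rw [PySem.Str.toList_join, List.nil_append,
        show ("" : String).toList = [] from rfl, pv_join_nil_flatten]
    simp only [List.map_map]
    exact pv_flatten_singletons string.toList
  | cons c t =>
    cases t with
    | nil =>
      simp only
      have hA := pv_foldA_match char tag c hc string.toList false []
      simp only [cond_false, List.map_nil, List.flatten_nil, List.nil_append] at hA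
      rw [PySem.Str.toList_join, show ("" : String).toList = [] from rfl,
          pv_join_nil_flatten, hA]
      obtain ⟨p0, rest', hsplit⟩ :=
        List.exists_cons_of_ne_nil (List.splitOnP_ne_nil (· == c) string.toList)
      have hsplit' : string.toList.splitOn c = p0 :: rest' := by
        simpa [List.splitOn] using hsplit
      rw [hsplit', List.map_cons]
      rw [pv_foldB tag]
      have hmaps : (rest'.map String.ofList).map String.toList = rest' := by
        simp [List.map_map, Function.comp_def]
      rw [hmaps]
      have := pv_split_build tag c string.toList false
      rw [hsplit'] at this
      simpa using this.symm
    | cons d t' =>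
      have h : ∀ x : Char, String.ofList [x] ≠ char := by
        intro x h
        have := congrArg String.toList h; simp [hc] at this
      simp only
      rw [pv_foldA_no_match char tag h string.toList 0 []]
      rw [PySem.Str.toList_join, List.nil_append,
          show ("" : String).toList = [] from rfl, pv_join_nil_flatten]
      simp only [List.map_map]
      exact pv_flatten_singletons string.toList
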